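-- pv_equiv track=rewrite | github.com/Som-gif/HelloByCloudPass | main.py | identifier_to_model_name
-- ===== SOURCE A (Python) =====
-- def identifier_to_model_name(identifier):
--     model_names = {
--         "Iphone 4" : ["iPhone3,1", "iPhone3,2", "iPhone3,3"],
--         "Iphone 4S" : ["iPhone4,1"],
--         "Iphone 5" : ["iPhone5,1", "iPhone5,2"],
--         "Iphone 5C" : ["iPhone5,3", "iPhone5,4"],
--         "Iphone 5S" : ["iPhone6,1", "iPhone6,2"],
--         "Iphone 6" : ["iPhone7,2"],
--         "Iphone 6 Plus" : ["iPhone7,1"],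
--         "Iphone 6S" : ["iPhone8,1"],
--         "Iphone 6S Plus" : ["iPhone8,2"],
--         "Iphone SE" : ["iPhone8,4"],
--         "Iphone 7" : ["iPhone9,1", "iPhone9,3"],
--         "Iphone 7 Plus" : ["iPhone9,2", "iPhone9,4"],
--         "Iphone 8" : ["iPhone10,1", "iPhone10,4"],
--         "Iphone 8 Plus" : ["iPhone10,2", "iPhone10,5"],
--         "Iphone X" : ["iPhone10,3", "iPhone10,6"],
--         "Iphone XS" : ["iPhone11,2"],
--         "Iphone XS Max" : ["iPhone11,4", "iPhone11,6"],
--         "Iphone XR" : ["iPhone11,8"],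
--         "Iphone 11" : ["iPhone12,1"],
--         "Iphone 11 Pro" : ["iPhone12,3"],
--         "Iphone 11 Pro Max" : ["iPhone12,5"],
--         "Iphone SE 2" : ["iPhone12,8"],
--         "Iphone 12 Mini" : ["iPhone13,1"],
--         "Iphone 12" : ["iPhone13,2"],
--         "Iphone 12 Pro" : ["iPhone13,3"],
--         "Iphone 12 Pro Max" : ["iPhone13,4"],
--         "Iphone 13 Mini" : ["iPhone14,4"],
--         "Iphone 13" : ["iPhone14,2", "iPhone14,5"],
--         "Iphone 13 Pro" : ["iPhone14,3"],
--         "Iphone 13 Pro Max" : ["iPhone14,1"]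
--     }
--
--     for model_name, identifiers in model_names.items():
--         if identifier in identifiers:
--             return model_name
--     return "Unknown"
-- ===== SOURCE B (Python) =====
-- _MODEL_BY_IDENTIFIER = {
--     "iPhone3,1": "Iphone 4",
--     "iPhone3,2": "Iphone 4",
--     "iPhone3,3": "Iphone 4",
--     "iPhone4,1": "Iphone 4S",
--     "iPhone5,1": "Iphone 5",
--     "iPhone5,2": "Iphone 5",
--     "iPhone5,3": "Iphone 5C",
--     "iPhone5,4": "Iphone 5C",
--     "iPhone6,1": "Iphone 5S",
--     "iPhone6,2": "Iphone 5S",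
--     "iPhone7,2": "Iphone 6",
--     "iPhone7,1": "Iphone 6 Plus",
--     "iPhone8,1": "Iphone 6S",
--     "iPhone8,2": "Iphone 6S Plus",
--     "iPhone8,4": "Iphone SE",
--     "iPhone9,1": "Iphone 7",
--     "iPhone9,3": "Iphone 7",
--     "iPhone9,2": "Iphone 7 Plus",
--     "iPhone9,4": "Iphone 7 Plus",
--     "iPhone10,1": "Iphone 8",
--     "iPhone10,4": "Iphone 8",
--     "iPhone10,2": "Iphone 8 Plus",
--     "iPhone10,5": "Iphone 8 Plus",
--     "iPhone10,3": "Iphone X",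
--     "iPhone10,6": "Iphone X",
--     "iPhone11,2": "Iphone XS",
--     "iPhone11,4": "Iphone XS Max",
--     "iPhone11,6": "Iphone XS Max",
--     "iPhone11,8": "Iphone XR",
--     "iPhone12,1": "Iphone 11",
--     "iPhone12,3": "Iphone 11 Pro",
--     "iPhone12,5": "Iphone 11 Pro Max",
--     "iPhone12,8": "Iphone SE 2",
--     "iPhone13,1": "Iphone 12 Mini",
--     "iPhone13,2": "Iphone 12",
--     "iPhone13,3": "Iphone 12 Pro",
--     "iPhone13,4": "Iphone 12 Pro Max",
--     "iPhone14,4": "Iphone 13 Mini",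
--     "iPhone14,2": "Iphone 13",
--     "iPhone14,5": "Iphone 13",
--     "iPhone14,3": "Iphone 13 Pro",
--     "iPhone14,1": "Iphone 13 Pro Max",
-- }
--
--
-- def identifier_to_model_name(identifier):
--     return _MODEL_BY_IDENTIFIER.get(identifier, "Unknown")
-- ===== Notes on version B (the rewrite author's own statement) =====
-- stated objective: simpler
-- what changed: Replaced the loop over a name-to-identifier-list dict and its inner list-membership test with a single flat identifier-to-name dict and one .get lookup, removing the loop entirely.
import Mathlib
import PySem

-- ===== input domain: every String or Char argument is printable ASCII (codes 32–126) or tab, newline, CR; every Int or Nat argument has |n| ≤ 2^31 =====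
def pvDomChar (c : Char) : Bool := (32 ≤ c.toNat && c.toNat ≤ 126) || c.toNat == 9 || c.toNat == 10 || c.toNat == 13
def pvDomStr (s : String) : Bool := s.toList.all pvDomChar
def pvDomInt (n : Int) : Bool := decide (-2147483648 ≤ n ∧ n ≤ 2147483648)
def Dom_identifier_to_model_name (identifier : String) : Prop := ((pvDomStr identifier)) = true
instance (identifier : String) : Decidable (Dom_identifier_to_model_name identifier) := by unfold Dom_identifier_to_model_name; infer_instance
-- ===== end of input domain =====

-- B replaces A's loop over name→identifier-list buckets with one direct lookup in a flat identifier→name dict (objective: simpler).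

-- ===== PORT A =====
-- A's dict of model name → identifier list, in insertion order
def pvTableA : List (String × List String) := [
  ("Iphone 4", ["iPhone3,1", "iPhone3,2", "iPhone3,3"]),
  ("Iphone 4S", ["iPhone4,1"]),
  ("Iphone 5", ["iPhone5,1", "iPhone5,2"]),
  ("Iphone 5C", ["iPhone5,3", "iPhone5,4"]),
  ("Iphone 5S", ["iPhone6,1", "iPhone6,2"]),
  ("Iphone 6", ["iPhone7,2"]),
  ("Iphone 6 Plus", ["iPhone7,1"]),
  ("Iphone 6S", ["iPhone8,1"]),
  ("Iphone 6S Plus", ["iPhone8,2"]),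
  ("Iphone SE", ["iPhone8,4"]),
  ("Iphone 7", ["iPhone9,1", "iPhone9,3"]),
  ("Iphone 7 Plus", ["iPhone9,2", "iPhone9,4"]),
  ("Iphone 8", ["iPhone10,1", "iPhone10,4"]),
  ("Iphone 8 Plus", ["iPhone10,2", "iPhone10,5"]),
  ("Iphone X", ["iPhone10,3", "iPhone10,6"]),
  ("Iphone XS", ["iPhone11,2"]),
  ("Iphone XS Max", ["iPhone11,4", "iPhone11,6"]),
  ("Iphone XR", ["iPhone11,8"]),
  ("Iphone 11", ["iPhone12,1"]),
  ("Iphone 11 Pro", ["iPhone12,3"]),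
  ("Iphone 11 Pro Max", ["iPhone12,5"]),
  ("Iphone SE 2", ["iPhone12,8"]),
  ("Iphone 12 Mini", ["iPhone13,1"]),
  ("Iphone 12", ["iPhone13,2"]),
  ("Iphone 12 Pro", ["iPhone13,3"]),
  ("Iphone 12 Pro Max", ["iPhone13,4"]),
  ("Iphone 13 Mini", ["iPhone14,4"]),
  ("Iphone 13", ["iPhone14,2", "iPhone14,5"]),
  ("Iphone 13 Pro", ["iPhone14,3"]),
  ("Iphone 13 Pro Max", ["iPhone14,1"])]

-- the 'for model_name, identifiers in model_names.items(): if identifier in identifiers: return model_name' loop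
def pvLoopA (identifier : String) : List (String × List String) → String
  | [] => "Unknown"
  | (name, ids) :: rest => if identifier ∈ ids then name else pvLoopA identifier rest

def identifier_to_model_name (identifier : String) : String :=
  pvLoopA identifier pvTableA

-- ===== PORT B =====
-- B's flat identifier → model-name dict literal
def pvFlatB : PySem.Dict String String := PySem.Dict.ofList [
  ("iPhone3,1", "Iphone 4"),
  ("iPhone3,2", "Iphone 4"),
  ("iPhone3,3", "Iphone 4"),
  ("iPhone4,1", "Iphone 4S"),
  ("iPhone5,1", "Iphone 5"),
  ("iPhone5,2", "Iphone 5"),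
  ("iPhone5,3", "Iphone 5C"),
  ("iPhone5,4", "Iphone 5C"),
  ("iPhone6,1", "Iphone 5S"),
  ("iPhone6,2", "Iphone 5S"),
  ("iPhone7,2", "Iphone 6"),
  ("iPhone7,1", "Iphone 6 Plus"),
  ("iPhone8,1", "Iphone 6S"),
  ("iPhone8,2", "Iphone 6S Plus"),
  ("iPhone8,4", "Iphone SE"),
  ("iPhone9,1", "Iphone 7"),
  ("iPhone9,3", "Iphone 7"),
  ("iPhone9,2", "Iphone 7 Plus"),
  ("iPhone9,4", "Iphone 7 Plus"),
  ("iPhone10,1", "Iphone 8"),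
  ("iPhone10,4", "Iphone 8"),
  ("iPhone10,2", "Iphone 8 Plus"),
  ("iPhone10,5", "Iphone 8 Plus"),
  ("iPhone10,3", "Iphone X"),
  ("iPhone10,6", "Iphone X"),
  ("iPhone11,2", "Iphone XS"),
  ("iPhone11,4", "Iphone XS Max"),
  ("iPhone11,6", "Iphone XS Max"),
  ("iPhone11,8", "Iphone XR"),
  ("iPhone12,1", "Iphone 11"),
  ("iPhone12,3", "Iphone 11 Pro"),
  ("iPhone12,5", "Iphone 11 Pro Max"),
  ("iPhone12,8", "Iphone SE 2"),
  ("iPhone13,1", "Iphone 12 Mini"),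
  ("iPhone13,2", "Iphone 12"),
  ("iPhone13,3", "Iphone 12 Pro"),
  ("iPhone13,4", "Iphone 12 Pro Max"),
  ("iPhone14,4", "Iphone 13 Mini"),
  ("iPhone14,2", "Iphone 13"),
  ("iPhone14,5", "Iphone 13"),
  ("iPhone14,3", "Iphone 13 Pro"),
  ("iPhone14,1", "Iphone 13 Pro Max")]

def identifier_to_model_name_alt (identifier : String) : String :=
  pvFlatB.getD identifier "Unknown"

-- ===== PRECONDITION & SPEC =====
def Spec_identifier_to_model_name (identifier : String) (out : String) : Prop := out = identifier_to_model_name_alt identifier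
instance (identifier : String) (out : String) : Decidable (Spec_identifier_to_model_name identifier out) := by unfold Spec_identifier_to_model_name; infer_instance

-- ===== CLAIM (what is proved, stated in full; the proofs are below) =====
def Claim_equal_identifier_to_model_name : Prop := ∀ (identifier : String), Dom_identifier_to_model_name identifier → Spec_identifier_to_model_name identifier (identifier_to_model_name identifier)

-- ===== LEMMAS AND PROOFS =====

-- flatten a bucket table into the identifier → name pair list
def pvFlatten (t : List (String × List String)) : List (String × String) :=
  t.flatMap fun p => p.2.map fun i => (i, p.1)

theorem pv_getD_flat_bucket (s n : String) (ids : List String) (rest : List (String × String)) :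
    (PySem.Dict.mk ((ids.map fun i => (i, n)) ++ rest)).getD s "Unknown"
      = if s ∈ ids then n else (PySem.Dict.mk rest).getD s "Unknown" := by
  induction ids with
  | nil => simp
  | cons i ids ih =>
    simp only [List.map_cons, List.cons_append, PySem.Dict.getD_eq_get?_getD,
      PySem.Dict.get?_mk_cons, List.mem_cons]
    by_cases h : s = i
    · simp [h]
    · have : (i == s) = false := by simp [Ne.symm h]
      simp only [this, Bool.false_eq_true, if_false]
      rw [← PySem.Dict.getD_eq_get?_getD, ← PySem.Dict.getD_eq_get?_getD, ih]
      simp [h]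

theorem pv_loop_eq_flat (s : String) (t : List (String × List String)) :
    pvLoopA s t = (PySem.Dict.mk (pvFlatten t)).getD s "Unknown" := by
  induction t with
  | nil => rfl
  | cons p rest ih =>
    obtain ⟨name, ids⟩ := p
    simp only [pvLoopA, pvFlatten, List.flatMap_cons, pv_getD_flat_bucket]
    rw [ih]; rfl

set_option maxRecDepth 4000 in
theorem pv_flatB_eq : pvFlatB = PySem.Dict.mk (pvFlatten pvTableA) := by decide

-- ===== VERDICT (by name: the statement is the Claim_ definition above) =====
theorem identifier_to_model_name_spec : Claim_equal_identifier_to_model_name := by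
  intro s _
  unfold Spec_identifier_to_model_name identifier_to_model_name identifier_to_model_name_alt
  rw [pv_flatB_eq, pv_loop_eq_flat]
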